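-- pv_equiv track=rewrite | github.com/marcosene/hbm2Java | apply_table_modifications.py | modify_markdown_tables
-- ===== SOURCE A (Python) =====
-- def modify_markdown_tables(markdown_content):
--     new_lines = []
--     lines = markdown_content.splitlines()
--     i = 0
--     while i < len(lines):
--         line = lines[i]
--         # Try to detect a table header
--         if line.strip().startswith("|") and line.strip().endswith("|") and \
--            i + 1 < len(lines) and lines[i+1].strip().startswith("|") and \
--            lines[i+1].strip().endswith("|") and ":---" in lines[i+1]:
--
--             header_line = lines[i]
--             separator_line = lines[i+1]
--
--             # Identify target columns
--             header_cells = [cell.strip() for cell in header_line.strip("|").split("|")]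
--             try:
--                 jpa_col_idx = header_cells.index("JPA Annotation(s)")
--                 hibernate_col_idx = header_cells.index("Hibernate Annotation(s) (if needed)")
--             except ValueError:
--                 # Columns not found, skip this table
--                 new_lines.append(line)
--                 i += 1
--                 continue
--
--             # Modify header
--             new_header_cells = header_cells[:jpa_col_idx] + \
--                                ["JPA/Hibernate Annotation(s)"] + \
--                                header_cells[hibernate_col_idx+1:]
--             new_lines.append("| " + " | ".join(new_header_cells) + " |")
--
--             # Modify separator
--             separator_cells = [cell.strip() for cell in separator_line.strip("|").split("|")]
--             # Estimate new column width or use a generic one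
--             # Simple approach: sum of old ones, or a fixed large one
--             # For simplicity, let's make the new column separator generously wide
--             new_separator_width = len("JPA/Hibernate Annotation(s)") + 20 # a bit of padding
--
--             new_separator_cells = separator_cells[:jpa_col_idx] + \
--                                   [":" + "-" * (new_separator_width -1) ] + \
--                                   separator_cells[hibernate_col_idx+1:]
--             new_lines.append("|" + "|".join(new_separator_cells) + "|")
--
--             i += 2 # Move past header and separator
--
--             # Process data rows
--             while i < len(lines) and lines[i].strip().startswith("|") and lines[i].strip().endswith("|"):
--                 row_line = lines[i]
--                 row_cells = [cell.strip() for cell in row_line.strip("|").split("|")]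
--
--                 if max(jpa_col_idx, hibernate_col_idx) < len(row_cells):
--                     jpa_content = row_cells[jpa_col_idx].strip()
--                     hibernate_content = row_cells[hibernate_col_idx].strip()
--
--                     combined_content = ""
--                     if jpa_content and hibernate_content and hibernate_content != "(No direct annotation)" and hibernate_content != "(No direct equivalent at package level)":
--                         if jpa_content.endswith("<br/>") or jpa_content.endswith("<br>"):
--                              combined_content = jpa_content + " " + hibernate_content
--                         else:
--                              combined_content = jpa_content + "<br/>" + hibernate_content
--                     elif jpa_content:
--                         combined_content = jpa_content
--                     elif hibernate_content and hibernate_content != "(No direct annotation)" and hibernate_content != "(No direct equivalent at package level)":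
--                         combined_content = hibernate_content
--                     else: # both empty or non-meaningful hibernate content
--                         combined_content = jpa_content # or just one of them, or empty string
--
--                     new_row_cells = row_cells[:jpa_col_idx] + \
--                                     [combined_content] + \
--                                     row_cells[hibernate_col_idx+1:]
--                     new_lines.append("| " + " | ".join(new_row_cells) + " |")
--                 else:
--                     # Malformed row or end of table content that looks like a row
--                     new_lines.append(row_line)
--                 i += 1
--             continue # continue to next line after table processing
--
--         new_lines.append(line)
--         i += 1
--
--     return "\n".join(new_lines)
-- ===== SOURCE B (Python) =====
-- # Run-based rewrite: split the document into maximal runs of table-looking lines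
-- # and transform each run as a unit, instead of A's index-driven while loop with
-- # positional look-ahead and a nested row loop (alternative decomposition, same cost).
--
-- MERGED = "JPA/Hibernate Annotation(s)"
-- SEP_CELL = ":" + "-" * (len(MERGED) + 19)
-- JPA_HDR = "JPA Annotation(s)"
-- HIB_HDR = "Hibernate Annotation(s) (if needed)"
--
--
-- def _is_row(line):
--     s = line.strip()
--     return s.startswith("|") and s.endswith("|")
--
--
-- def _cells(line):
--     return [c.strip() for c in line.strip("|").split("|")]
--
--
-- def _splice(cells, j, h, mid):
--     return cells[:j] + [mid] + cells[h + 1:]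
--
--
-- def _combine(jpa, hib):
--     meaningful = hib not in ("", "(No direct annotation)",
--                              "(No direct equivalent at package level)")
--     if jpa and meaningful:
--         glue = " " if jpa.endswith("<br/>") or jpa.endswith("<br>") else "<br/>"
--         return jpa + glue + hib
--     if jpa:
--         return jpa
--     return hib if meaningful else jpa
--
--
-- def _row(line, j, h):
--     cells = _cells(line)
--     if len(cells) <= max(j, h):
--         return line
--     merged = _combine(cells[j].strip(), cells[h].strip())
--     return "| " + " | ".join(_splice(cells, j, h, merged)) + " |"
--
--
-- def _table(header, sep, rows, j, h):
--     out = ["| " + " | ".join(_splice(_cells(header), j, h, MERGED)) + " |",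
--            "|" + "|".join(_splice(_cells(sep), j, h, SEP_CELL)) + "|"]
--     out.extend(_row(r, j, h) for r in rows)
--     return out
--
--
-- def _emit_run(run):
--     out = []
--     k = 0
--     while k < len(run):
--         if k + 1 < len(run) and ":---" in run[k + 1]:
--             cells = _cells(run[k])
--             if JPA_HDR in cells and HIB_HDR in cells:
--                 return out + _table(run[k], run[k + 1], run[k + 2:],
--                                     cells.index(JPA_HDR), cells.index(HIB_HDR))
--         out.append(run[k])
--         k += 1
--     return out
--
--
-- def modify_markdown_tables(markdown_content):
--     lines = markdown_content.splitlines()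
--     n = len(lines)
--     out = []
--     i = 0
--     while i < n:
--         if _is_row(lines[i]):
--             start = i
--             while i < n and _is_row(lines[i]):
--                 i += 1
--             out.extend(_emit_run(lines[start:i]))
--         else:
--             out.append(lines[i])
--             i += 1
--     return "\n".join(out)
-- ===== Notes on version B (the rewrite author's own statement) =====
-- stated objective: alternative
-- what changed: B splits the line list into maximal runs of table-looking lines and rewrites each run as a unit (a scan that looks for a header/separator pair and then bulk-maps the remaining rows), instead of A's single index-driven while loop with positional look-ahead and a nested data-row loop.
import Mathlib
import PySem

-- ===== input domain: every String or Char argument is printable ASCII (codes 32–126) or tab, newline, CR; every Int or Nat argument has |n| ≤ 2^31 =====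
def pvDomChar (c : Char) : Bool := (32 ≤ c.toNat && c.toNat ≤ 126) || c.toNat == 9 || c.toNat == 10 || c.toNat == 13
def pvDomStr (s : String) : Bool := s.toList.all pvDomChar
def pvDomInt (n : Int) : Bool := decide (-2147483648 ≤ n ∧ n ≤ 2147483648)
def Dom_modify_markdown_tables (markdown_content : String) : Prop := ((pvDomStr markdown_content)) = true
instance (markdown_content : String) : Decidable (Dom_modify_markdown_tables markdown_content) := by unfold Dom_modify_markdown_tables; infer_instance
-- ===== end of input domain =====

-- B splits the document into maximal runs of table-looking lines and rewrites each run as a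
-- unit, instead of A's index-driven while loop with look-ahead (alternative decomposition, same cost).

-- ===== PORT A =====
-- A, transliterated: an index-driven while loop (pvA_loop) whose inner data-row while
-- loop is pvA_rows (returning the accumulator and the new index); the three straight-line
-- blocks of A's body (header rewrite, separator rewrite, row rewrite) are the three
-- helpers below, each a line-for-line copy of A's statements.
-- '.split("|")' is ported as '(PySem.Str.split? · "|").getD []' — the separator is the
-- nonempty literal "|", so split? is always `some` and the getD is exact;
-- '"-" * n' is ported by hand as 'String.ofList (List.replicate n '-')' (exact for n ≥ 0).

-- A's header modification block
def pvA_newHeader (header_line : String) (jpa_col_idx hibernate_col_idx : Nat) : String :=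
  let header_cells := ((PySem.Str.split? (PySem.Str.stripChars header_line "|") "|").getD []).map PySem.Str.strip
  let new_header_cells := PySem.List.slice header_cells none (some (jpa_col_idx : Int)) ++
      ["JPA/Hibernate Annotation(s)"] ++
      PySem.List.slice header_cells (some ((hibernate_col_idx : Int) + 1)) none
  "| " ++ PySem.Str.join " | " new_header_cells ++ " |"

-- A's separator modification block
def pvA_newSeparator (separator_line : String) (jpa_col_idx hibernate_col_idx : Nat) : String :=
  let separator_cells := ((PySem.Str.split? (PySem.Str.stripChars separator_line "|") "|").getD []).map PySem.Str.strip
  let new_separator_width : Int := PySem.Str.len "JPA/Hibernate Annotation(s)" + 20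
  let new_separator_cells := PySem.List.slice separator_cells none (some (jpa_col_idx : Int)) ++
      [":" ++ String.ofList (List.replicate (new_separator_width - 1).toNat '-')] ++
      PySem.List.slice separator_cells (some ((hibernate_col_idx : Int) + 1)) none
  "|" ++ PySem.Str.join "|" new_separator_cells ++ "|"

-- the body of A's inner data-row loop (both branches of its max(...) < len(row_cells) test)
def pvA_processRow (row_line : String) (jpa_col_idx hibernate_col_idx : Nat) : String :=
  let row_cells := ((PySem.Str.split? (PySem.Str.stripChars row_line "|") "|").getD []).map PySem.Str.strip
  if max jpa_col_idx hibernate_col_idx < row_cells.length then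
    let jpa_content := PySem.Str.strip (PySem.List.pyGetD row_cells (jpa_col_idx : Int) "")
    let hibernate_content := PySem.Str.strip (PySem.List.pyGetD row_cells (hibernate_col_idx : Int) "")
    let combined_content :=
      if (((decide (jpa_content ≠ "") && decide (hibernate_content ≠ "")) &&
            decide (hibernate_content ≠ "(No direct annotation)")) &&
            decide (hibernate_content ≠ "(No direct equivalent at package level)")) = true then
        if (PySem.Str.endswith jpa_content "<br/>" || PySem.Str.endswith jpa_content "<br>") = true then
          jpa_content ++ " " ++ hibernate_content
        else
          jpa_content ++ "<br/>" ++ hibernate_content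
      else if jpa_content ≠ "" then jpa_content
      else if ((decide (hibernate_content ≠ "") && decide (hibernate_content ≠ "(No direct annotation)")) &&
            decide (hibernate_content ≠ "(No direct equivalent at package level)")) = true then
        hibernate_content
      else jpa_content
    let new_row_cells := PySem.List.slice row_cells none (some (jpa_col_idx : Int)) ++ [combined_content] ++
        PySem.List.slice row_cells (some ((hibernate_col_idx : Int) + 1)) none
    "| " ++ PySem.Str.join " | " new_row_cells ++ " |"
  else row_line

-- A's inner 'while i < len(lines) and … startswith("|") … endswith("|")' data-row loop.
-- fuel (≥ lines.length - i at every call) only makes the recursion structural.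
def pvA_rows (lines : List String) (jpa_col_idx hibernate_col_idx : Nat) (fuel : Nat) (i : Nat)
    (acc : List String) : List String × Nat :=
  match fuel with
  | 0 => (acc, i)
  | fuel + 1 =>
    if (decide (i < lines.length) && (PySem.Str.startswith (PySem.Str.strip (lines.getD i "")) "|"
        && PySem.Str.endswith (PySem.Str.strip (lines.getD i "")) "|")) = true then
      pvA_rows lines jpa_col_idx hibernate_col_idx fuel (i + 1)
        (acc ++ [pvA_processRow (lines.getD i "") jpa_col_idx hibernate_col_idx])
    else (acc, i)

-- A's 'try: … .index(…) … except ValueError' block: both lookups must succeed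
def pvA_tryCols (header_cells : List String) : Option (Nat × Nat) :=
  match PySem.List.index? header_cells "JPA Annotation(s)",
        PySem.List.index? header_cells "Hibernate Annotation(s) (if needed)" with
  | some jpa_col_idx, some hibernate_col_idx => some (jpa_col_idx, hibernate_col_idx)
  | _, _ => none

-- the table-header branch of A's loop body: detection condition, try/except column
-- lookup, emission of the rewritten header/separator, and the inner data-row loop;
-- `none` = condition failed or ValueError (A then appends the line and advances by 1)
def pvA_stepTable (lines : List String) (i : Nat) (acc : List String) :
    Option (List String × Nat) :=
  let line := lines.getD i ""
  let nxt := lines.getD (i + 1) ""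
  if ((((PySem.Str.startswith (PySem.Str.strip line) "|" && PySem.Str.endswith (PySem.Str.strip line) "|") &&
        decide (i + 1 < lines.length)) &&
        (PySem.Str.startswith (PySem.Str.strip nxt) "|" && PySem.Str.endswith (PySem.Str.strip nxt) "|")) &&
        PySem.Str.isIn ":---" nxt) = true then
    match pvA_tryCols (((PySem.Str.split? (PySem.Str.stripChars line "|") "|").getD []).map PySem.Str.strip) with
    | some (jpa_col_idx, hibernate_col_idx) =>
      some (pvA_rows lines jpa_col_idx hibernate_col_idx lines.length (i + 2)
        (acc ++ [pvA_newHeader line jpa_col_idx hibernate_col_idx] ++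
         [pvA_newSeparator nxt jpa_col_idx hibernate_col_idx]))
    | none => none
  else none

-- A's outer 'while i < len(lines)' loop; same fuel scheme (fuel ≥ lines.length - i)
def pvA_loop (lines : List String) (fuel : Nat) (i : Nat) (acc : List String) : List String :=
  match fuel with
  | 0 => acc
  | fuel + 1 =>
    if i < lines.length then
      match pvA_stepTable lines i acc with
      | some r => pvA_loop lines fuel r.2 r.1
      | none => pvA_loop lines fuel (i + 1) (acc ++ [lines.getD i ""])
    else acc

def modify_markdown_tables (markdown_content : String) : String :=
  PySem.Str.join "\n" (pvA_loop (PySem.Str.splitlines markdown_content) (PySem.Str.splitlines markdown_content).length 0 [])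

-- ===== PORT B =====
-- B, transliterated: module constants, small helpers, a run rewriter (pvB_emitRun, the
-- 'while k' scan of Source B as structural recursion on the run) and the outer run-splitting
-- loop (pvB_go: Source B's 'while i' with its inner run scan = takeWhile/dropWhile on the rest).
-- '.split("|")' / '"-" * n' / slices are ported exactly as in A's port (nonnegative
-- slices 'cells[:j]' / 'cells[h+1:]' as List.take / List.drop, exact for Nat indices).

def pvB_sepCell : String :=
  ":" ++ String.ofList (List.replicate (PySem.Str.len "JPA/Hibernate Annotation(s)" + 19).toNat '-')

def pvB_isRow (line : String) : Bool :=
  PySem.Str.startswith (PySem.Str.strip line) "|" && PySem.Str.endswith (PySem.Str.strip line) "|"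

def pvB_cells (line : String) : List String :=
  ((PySem.Str.split? (PySem.Str.stripChars line "|") "|").getD []).map PySem.Str.strip

def pvB_splice (cells : List String) (j h : Nat) (mid : String) : List String :=
  cells.take j ++ [mid] ++ cells.drop (h + 1)

-- Source B's 'hib not in (…)' tuple test, ported as the negated disjunction
def pvB_combine (jpa hib : String) : String :=
  let meaningful := !(hib == "" || hib == "(No direct annotation)" ||
      hib == "(No direct equivalent at package level)")
  if (decide (jpa ≠ "") && meaningful) = true then
    if (PySem.Str.endswith jpa "<br/>" || PySem.Str.endswith jpa "<br>") = true then
      jpa ++ " " ++ hib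
    else jpa ++ "<br/>" ++ hib
  else if jpa ≠ "" then jpa
  else if meaningful = true then hib
  else jpa

def pvB_row (line : String) (j h : Nat) : String :=
  let cells := pvB_cells line
  if cells.length ≤ max j h then line
  else
    let merged := pvB_combine (PySem.Str.strip (cells.getD j "")) (PySem.Str.strip (cells.getD h ""))
    "| " ++ PySem.Str.join " | " (pvB_splice cells j h merged) ++ " |"

def pvB_table (header sep : String) (rows : List String) (j h : Nat) : List String :=
  ("| " ++ PySem.Str.join " | " (pvB_splice (pvB_cells header) j h "JPA/Hibernate Annotation(s)") ++ " |") ::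
  ("|" ++ PySem.Str.join "|" (pvB_splice (pvB_cells sep) j h pvB_sepCell) ++ "|") ::
  rows.map (fun r => pvB_row r j h)

-- Source B's _emit_run: scan the run for a header/separator pair; on success rewrite the
-- whole remainder of the run as a table, otherwise emit the line and keep scanning
def pvB_emitRun : List String → List String
  | [] => []
  | [x] => [x]
  | x :: y :: rest =>
    if PySem.Str.isIn ":---" y = true then
      let cells := pvB_cells x
      if (cells.contains "JPA Annotation(s)" && cells.contains "Hibernate Annotation(s) (if needed)") = true then
        pvB_table x y rest ((PySem.List.index? cells "JPA Annotation(s)").getD 0)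
          ((PySem.List.index? cells "Hibernate Annotation(s) (if needed)").getD 0)
      else x :: pvB_emitRun (y :: rest)
    else x :: pvB_emitRun (y :: rest)

-- Source B's outer loop: a non-table line is copied; a table line opens a maximal run
def pvB_go : List String → List String
  | [] => []
  | l :: ls =>
    if pvB_isRow l then
      pvB_emitRun (l :: ls.takeWhile pvB_isRow) ++ pvB_go (ls.dropWhile pvB_isRow)
    else l :: pvB_go ls
  termination_by ls => ls.length
  decreasing_by
  · have := List.length_dropWhile_le pvB_isRow ls
    simp only [List.length_cons]
    omega
  · simp

def modify_markdown_tables_alt (markdown_content : String) : String :=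
  PySem.Str.join "\n" (pvB_go (PySem.Str.splitlines markdown_content))

-- ===== PRECONDITION & SPEC =====
def Spec_modify_markdown_tables (markdown_content : String) (out : String) : Prop := out = modify_markdown_tables_alt markdown_content
instance (markdown_content : String) (out : String) : Decidable (Spec_modify_markdown_tables markdown_content out) := by unfold Spec_modify_markdown_tables; infer_instance

-- ===== CLAIM (what is proved, stated in full; the proofs are below) =====
def Claim_equal_modify_markdown_tables : Prop := ∀ (markdown_content : String), Dom_modify_markdown_tables markdown_content → Spec_modify_markdown_tables markdown_content (modify_markdown_tables markdown_content)

-- ===== LEMMAS AND PROOFS =====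

theorem pvDrop_cons (lines : List String) (i : Nat) (hi : i < lines.length) :
    lines.drop i = lines.getD i "" :: lines.drop (i + 1) := by
  rw [List.drop_eq_getElem_cons hi, List.getD_eq_getElem?_getD, List.getElem?_eq_getElem hi]; rfl

theorem pvDrop_len_takeWhile (l : List String) (p : String → Bool) :
    l.drop (l.takeWhile p).length = l.dropWhile p := by
  induction l with
  | nil => rfl
  | cons x xs ih =>
    by_cases hx : p x = true
    · simpa [List.dropWhile_cons, hx] using ih
    · simp [hx]

-- equation lemmas for the two run-level recursions of B's port
theorem pvB_go_nil : pvB_go [] = [] := by rw [pvB_go]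

theorem pvB_go_cons (l : String) (ls : List String) :
    pvB_go (l :: ls) =
      if pvB_isRow l then
        pvB_emitRun (l :: ls.takeWhile pvB_isRow) ++ pvB_go (ls.dropWhile pvB_isRow)
      else l :: pvB_go ls := by
  conv_lhs => rw [pvB_go]

theorem pvB_emitRun_nil : pvB_emitRun [] = [] := rfl

theorem pvB_emitRun_cons2 (x y : String) (rest : List String) :
    pvB_emitRun (x :: y :: rest) =
      if PySem.Str.isIn ":---" y = true then
        if ((pvB_cells x).contains "JPA Annotation(s)" &&
            (pvB_cells x).contains "Hibernate Annotation(s) (if needed)") = true then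
          pvB_table x y rest ((PySem.List.index? (pvB_cells x) "JPA Annotation(s)").getD 0)
            ((PySem.List.index? (pvB_cells x) "Hibernate Annotation(s) (if needed)").getD 0)
        else x :: pvB_emitRun (y :: rest)
      else x :: pvB_emitRun (y :: rest) := rfl

-- A's loop bodies with B's named helpers folded back in (all definitional)
theorem pvA_rows_unfold (lines : List String) (j h fuel i : Nat) (acc : List String) :
    pvA_rows lines j h (fuel + 1) i acc =
      if (decide (i < lines.length) && pvB_isRow (lines.getD i "")) = true then
        pvA_rows lines j h fuel (i + 1) (acc ++ [pvA_processRow (lines.getD i "") j h])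
      else (acc, i) := rfl

-- contains-pair failure means A's try/except raises ValueError
theorem pvTryCols_none (cells : List String)
    (h : (cells.contains "JPA Annotation(s)" &&
          cells.contains "Hibernate Annotation(s) (if needed)") = false) :
    pvA_tryCols cells = none := by
  unfold pvA_tryCols
  rcases Bool.and_eq_false_iff.mp h with h1 | h1
  · have hm : "JPA Annotation(s)" ∉ cells := by simpa using h1
    rw [(PySem.List.index?_eq_none_iff _ _).mpr hm]
  · have hm : "Hibernate Annotation(s) (if needed)" ∉ cells := by simpa using h1
    rw [(PySem.List.index?_eq_none_iff _ _).mpr hm]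
    cases PySem.List.index? cells "JPA Annotation(s)" <;> rfl

theorem pvA_stepTable_none_cond (lines : List String) (i : Nat) (acc : List String)
    (hc : ¬ ((((pvB_isRow (lines.getD i "") && decide (i + 1 < lines.length)) &&
        pvB_isRow (lines.getD (i + 1) "")) && PySem.Str.isIn ":---" (lines.getD (i + 1) "")) = true)) :
    pvA_stepTable lines i acc = none := by
  simp only [pvA_stepTable]
  rw [if_neg (show ¬ (((((PySem.Str.startswith (PySem.Str.strip (lines.getD i "")) "|" &&
      PySem.Str.endswith (PySem.Str.strip (lines.getD i "")) "|") && decide (i + 1 < lines.length)) &&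
      (PySem.Str.startswith (PySem.Str.strip (lines.getD (i + 1) "")) "|" &&
      PySem.Str.endswith (PySem.Str.strip (lines.getD (i + 1) "")) "|")) &&
      PySem.Str.isIn ":---" (lines.getD (i + 1) "")) = true) from hc)]

theorem pvA_stepTable_some (lines : List String) (i : Nat) (acc : List String) (j k : Nat)
    (hco : ((((pvB_isRow (lines.getD i "") && decide (i + 1 < lines.length)) &&
        pvB_isRow (lines.getD (i + 1) "")) && PySem.Str.isIn ":---" (lines.getD (i + 1) "")) = true))
    (htryc : pvA_tryCols (pvB_cells (lines.getD i "")) = some (j, k)) :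
    pvA_stepTable lines i acc =
      some (pvA_rows lines j k lines.length (i + 2)
        (acc ++ [pvA_newHeader (lines.getD i "") j k] ++
         [pvA_newSeparator (lines.getD (i + 1) "") j k])) := by
  simp only [pvA_stepTable]
  rw [if_pos (show (((((PySem.Str.startswith (PySem.Str.strip (lines.getD i "")) "|" &&
      PySem.Str.endswith (PySem.Str.strip (lines.getD i "")) "|") && decide (i + 1 < lines.length)) &&
      (PySem.Str.startswith (PySem.Str.strip (lines.getD (i + 1) "")) "|" &&
      PySem.Str.endswith (PySem.Str.strip (lines.getD (i + 1) "")) "|")) &&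
      PySem.Str.isIn ":---" (lines.getD (i + 1) "")) = true) from hco),
    show (((PySem.Str.split? (PySem.Str.stripChars (lines.getD i "") "|") "|").getD []).map PySem.Str.strip) =
      pvB_cells (lines.getD i "") from rfl, htryc]

theorem pvA_stepTable_none_cols (lines : List String) (i : Nat) (acc : List String)
    (hcp : ((pvB_cells (lines.getD i "")).contains "JPA Annotation(s)" &&
        (pvB_cells (lines.getD i "")).contains "Hibernate Annotation(s) (if needed)") = false) :
    pvA_stepTable lines i acc = none := by
  simp only [pvA_stepTable]
  split
  · rw [show (((PySem.Str.split? (PySem.Str.stripChars (lines.getD i "") "|") "|").getD []).map PySem.Str.strip) =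
        pvB_cells (lines.getD i "") from rfl, pvTryCols_none _ hcp]
  · rfl

theorem pvA_loop_succ_some (lines : List String) (fuel i : Nat) (acc : List String)
    (r : List String × Nat) (hi : i < lines.length)
    (hst : pvA_stepTable lines i acc = some r) :
    pvA_loop lines (fuel + 1) i acc = pvA_loop lines fuel r.2 r.1 := by
  rw [pvA_loop, if_pos hi, hst]

theorem pvA_loop_succ_none (lines : List String) (fuel i : Nat) (acc : List String)
    (hi : i < lines.length) (hst : pvA_stepTable lines i acc = none) :
    pvA_loop lines (fuel + 1) i acc = pvA_loop lines fuel (i + 1) (acc ++ [lines.getD i ""]) := by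
  rw [pvA_loop, if_pos hi, hst]

-- B's take/drop splice is A's slice pair around the merged cell
theorem pvSplice_eq (cells : List String) (j h : Nat) (mid : String) :
    PySem.List.slice cells none (some (j : Int)) ++ [mid] ++
      PySem.List.slice cells (some ((h : Int) + 1)) none = pvB_splice cells j h mid := by
  have hcast : ((h : Int) + 1) = ((h + 1 : Nat) : Int) := by push_cast; ring
  rw [hcast, PySem.List.slice_to_natCast, PySem.List.slice_from_natCast, pvB_splice]

theorem pvHeader_eq (line : String) (j h : Nat) :
    "| " ++ PySem.Str.join " | " (pvB_splice (pvB_cells line) j h "JPA/Hibernate Annotation(s)") ++ " |" =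
      pvA_newHeader line j h := by
  unfold pvA_newHeader
  rw [← pvSplice_eq]
  rfl

theorem pvSep_eq (line : String) (j h : Nat) :
    "|" ++ PySem.Str.join "|" (pvB_splice (pvB_cells line) j h pvB_sepCell) ++ "|" =
      pvA_newSeparator line j h := by
  have harg : PySem.Str.len "JPA/Hibernate Annotation(s)" + 19 =
      PySem.Str.len "JPA/Hibernate Annotation(s)" + 20 - 1 := by ring
  have hm : pvB_sepCell =
      ":" ++ String.ofList (List.replicate (PySem.Str.len "JPA/Hibernate Annotation(s)" + 20 - 1).toNat '-') := by
    unfold pvB_sepCell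
    rw [harg]
  rw [hm]
  unfold pvA_newSeparator
  rw [← pvSplice_eq]
  rfl

theorem pvCombine_eq (jpa hib : String) :
    pvB_combine jpa hib =
      (if (((decide (jpa ≠ "") && decide (hib ≠ "")) &&
            decide (hib ≠ "(No direct annotation)")) &&
            decide (hib ≠ "(No direct equivalent at package level)")) = true then
        if (PySem.Str.endswith jpa "<br/>" || PySem.Str.endswith jpa "<br>") = true then
          jpa ++ " " ++ hib
        else jpa ++ "<br/>" ++ hib
      else if jpa ≠ "" then jpa
      else if ((decide (hib ≠ "") && decide (hib ≠ "(No direct annotation)")) &&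
            decide (hib ≠ "(No direct equivalent at package level)")) = true then hib
      else jpa) := by
  unfold pvB_combine
  by_cases h2 : hib = "" <;> by_cases h3 : hib = "(No direct annotation)" <;>
    by_cases h4 : hib = "(No direct equivalent at package level)" <;>
    simp [h2, h3, h4]

theorem pvRow_eq (line : String) (j h : Nat) :
    pvB_row line j h = pvA_processRow line j h := by
  simp only [pvB_row, pvA_processRow, pvB_cells, pvB_splice]
  by_cases hlen :
      (((PySem.Str.split? (PySem.Str.stripChars line "|") "|").getD []).map PySem.Str.strip).length ≤ max j h
  · rw [if_pos hlen, if_neg (by omega)]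
  · rw [if_neg hlen, if_pos (by omega)]
    rw [PySem.List.pyGetD_natCast, PySem.List.pyGetD_natCast, pvCombine_eq,
      show ((h : Int) + 1) = ((h + 1 : Nat) : Int) from by push_cast; ring,
      PySem.List.slice_to_natCast, PySem.List.slice_from_natCast]

theorem pvB_go_split (ls : List String) :
    pvB_go ls = pvB_emitRun (ls.takeWhile pvB_isRow) ++ pvB_go (ls.dropWhile pvB_isRow) := by
  cases ls with
  | nil => simp [pvB_go_nil, pvB_emitRun]
  | cons l ls =>
    by_cases hl : pvB_isRow l = true
    · rw [List.takeWhile_cons, if_pos hl, List.dropWhile_cons, if_pos hl, pvB_go_cons, if_pos hl]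
    · rw [List.takeWhile_cons, if_neg hl, List.dropWhile_cons, if_neg hl]
      exact (List.nil_append _).symm

-- A's inner data-row loop collects exactly the table-looking prefix, row-rewritten
theorem pvA_rows_eq (lines : List String) (j h : Nat) (fuel i : Nat) (acc : List String)
    (hf : lines.length - i ≤ fuel) :
    pvA_rows lines j h fuel i acc =
      (acc ++ ((lines.drop i).takeWhile pvB_isRow).map (fun r => pvA_processRow r j h),
       i + ((lines.drop i).takeWhile pvB_isRow).length) := by
  induction fuel generalizing i acc with
  | zero =>
    have hnil : lines.drop i = [] := List.drop_eq_nil_of_le (by omega)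
    simp [pvA_rows, hnil]
  | succ fuel ih =>
    rw [pvA_rows_unfold]
    by_cases hi : i < lines.length
    · have hdc := pvDrop_cons lines i hi
      by_cases hr : pvB_isRow (lines.getD i "") = true
      · rw [if_pos (Bool.and_eq_true_iff.mpr ⟨decide_eq_true hi, hr⟩)]
        rw [ih (i + 1) _ (by omega), hdc, List.takeWhile_cons, if_pos hr]
        rw [Prod.mk.injEq]
        refine ⟨by simp, by simp; omega⟩
      · rw [Bool.not_eq_true] at hr
        have hcne : ¬ ((decide (i < lines.length) && pvB_isRow (lines.getD i "")) = true) := by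
          rw [Bool.and_eq_true]
          rintro ⟨-, h2⟩
          rw [hr] at h2
          cases h2
        rw [if_neg hcne, hdc, List.takeWhile_cons, if_neg (by rw [hr]; decide)]
        simp
    · have hcne : ¬ ((decide (i < lines.length) && pvB_isRow (lines.getD i "")) = true) := by
        rw [Bool.and_eq_true]
        rintro ⟨h1, -⟩
        exact absurd (of_decide_eq_true h1) hi
      rw [if_neg hcne]
      have hnil : lines.drop i = [] := List.drop_eq_nil_of_le (by omega)
      simp [hnil]

-- when the header attempt at the head of a run fails, Source B's run scan emits it verbatim
theorem pvEmitRun_cons_fail (l : String) (tW : List String)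
    (hfail : tW = [] ∨ (∃ y rest, tW = y :: rest ∧
      (PySem.Str.isIn ":---" y = false ∨
       ((pvB_cells l).contains "JPA Annotation(s)" &&
        (pvB_cells l).contains "Hibernate Annotation(s) (if needed)") = false))) :
    pvB_emitRun (l :: tW) = l :: pvB_emitRun tW := by
  rcases hfail with h0 | ⟨y, rest, hyw, hy⟩
  · subst h0; rfl
  · subst hyw
    rcases hy with hy | hy
    · rw [pvB_emitRun_cons2, if_neg (by rw [hy]; decide)]
    · rw [pvB_emitRun_cons2]
      by_cases hin : PySem.Str.isIn ":---" y = true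
      · rw [if_pos hin, if_neg (by rw [hy]; decide)]
      · rw [if_neg hin]

-- A's outer loop, started at index i, produces B's run-splitting pass over the rest
theorem pvA_loop_eq (lines : List String) (fuel i : Nat) (acc : List String)
    (hf : lines.length - i ≤ fuel) :
    pvA_loop lines fuel i acc = acc ++ pvB_go (lines.drop i) := by
  induction fuel generalizing i acc with
  | zero =>
    have hnil : lines.drop i = [] := List.drop_eq_nil_of_le (by omega)
    simp [pvA_loop, hnil, pvB_go_nil]
  | succ fuel ih =>
    by_cases hi : i < lines.length
    · have hdc := pvDrop_cons lines i hi
      by_cases hr : pvB_isRow (lines.getD i "") = true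
      · -- table-looking line: B opens a run
        rw [hdc, pvB_go_cons, if_pos hr]
        by_cases hn : i + 1 < lines.length
        · have hdc2 := pvDrop_cons lines (i + 1) hn
          by_cases hrn : pvB_isRow (lines.getD (i + 1) "") = true
          · -- the run has a second line
            have htw : (lines.drop (i + 1)).takeWhile pvB_isRow =
                lines.getD (i + 1) "" :: (lines.drop (i + 2)).takeWhile pvB_isRow := by
              rw [hdc2, List.takeWhile_cons, if_pos hrn]
            have hdw : (lines.drop (i + 1)).dropWhile pvB_isRow =
                (lines.drop (i + 2)).dropWhile pvB_isRow := by
              rw [hdc2, List.dropWhile_cons, if_pos hrn]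
            by_cases hin : PySem.Str.isIn ":---" (lines.getD (i + 1) "") = true
            · by_cases hcp : ((pvB_cells (lines.getD i "")).contains "JPA Annotation(s)" &&
                  (pvB_cells (lines.getD i "")).contains "Hibernate Annotation(s) (if needed)") = true
              · -- success: A rewrites the table; B rewrites the run
                have hmJ : "JPA Annotation(s)" ∈ pvB_cells (lines.getD i "") := by
                  simpa using (Bool.and_eq_true_iff.mp hcp).1
                have hmH : "Hibernate Annotation(s) (if needed)" ∈ pvB_cells (lines.getD i "") := by
                  simpa using (Bool.and_eq_true_iff.mp hcp).2
                obtain ⟨j, hj⟩ := Option.isSome_iff_exists.mp ((PySem.List.index?_isSome_iff _ _).mpr hmJ)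
                obtain ⟨k, hk⟩ := Option.isSome_iff_exists.mp ((PySem.List.index?_isSome_iff _ _).mpr hmH)
                have htryc : pvA_tryCols (pvB_cells (lines.getD i "")) = some (j, k) := by
                  unfold pvA_tryCols
                  rw [hj, hk]
                have hco : (((pvB_isRow (lines.getD i "") && decide (i + 1 < lines.length)) &&
                    pvB_isRow (lines.getD (i + 1) "")) &&
                    PySem.Str.isIn ":---" (lines.getD (i + 1) "")) = true :=
                  Bool.and_eq_true_iff.mpr ⟨Bool.and_eq_true_iff.mpr
                    ⟨Bool.and_eq_true_iff.mpr ⟨hr, decide_eq_true hn⟩, hrn⟩, hin⟩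
                have hst := pvA_stepTable_some lines i acc j k hco htryc
                rw [pvA_loop_succ_some lines fuel i acc _ hi hst]
                rw [pvA_rows_eq lines j k lines.length (i + 2) _ (by omega)]
                have hdrop2 : lines.drop (i + 2 + ((lines.drop (i + 2)).takeWhile pvB_isRow).length) =
                    (lines.drop (i + 2)).dropWhile pvB_isRow := by
                  rw [← pvDrop_len_takeWhile (lines.drop (i + 2)) pvB_isRow, List.drop_drop]
                rw [ih (i + 2 + ((lines.drop (i + 2)).takeWhile pvB_isRow).length) _ (by omega), hdrop2]
                -- B side: unfold the run rewriter on the successful header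
                rw [htw, hdw, pvB_emitRun_cons2, if_pos hin, if_pos hcp, hj, hk]
                simp only [Option.getD_some]
                unfold pvB_table
                rw [pvHeader_eq, pvSep_eq]
                have hmap : ((lines.drop (i + 2)).takeWhile pvB_isRow).map (fun r => pvB_row r j k) =
                    ((lines.drop (i + 2)).takeWhile pvB_isRow).map (fun r => pvA_processRow r j k) :=
                  List.map_congr_left (fun r _ => pvRow_eq r j k)
                rw [hmap]
                simp
              · -- columns missing: ValueError path
                rw [Bool.not_eq_true] at hcp
                have hst := pvA_stepTable_none_cols lines i acc hcp
                rw [pvA_loop_succ_none lines fuel i acc hi hst, ih (i + 1) _ (by omega)]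
                rw [pvEmitRun_cons_fail _ _ (Or.inr ⟨_, _, htw, Or.inr hcp⟩)]
                rw [pvB_go_split (lines.drop (i + 1)), htw, hdw]
                simp
            · -- no ':---' in the next line
              rw [Bool.not_eq_true] at hin
              have hcne : ¬ ((((pvB_isRow (lines.getD i "") && decide (i + 1 < lines.length)) &&
                  pvB_isRow (lines.getD (i + 1) "")) &&
                  PySem.Str.isIn ":---" (lines.getD (i + 1) "")) = true) := by
                rw [Bool.and_eq_true]
                rintro ⟨-, h2⟩
                rw [hin] at h2
                cases h2
              have hst := pvA_stepTable_none_cond lines i acc hcne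
              rw [pvA_loop_succ_none lines fuel i acc hi hst, ih (i + 1) _ (by omega)]
              rw [pvEmitRun_cons_fail _ _ (Or.inr ⟨_, _, htw, Or.inl hin⟩)]
              rw [pvB_go_split (lines.drop (i + 1)), htw, hdw]
              simp
          · -- next line is not table-looking: the run is just this line
            rw [Bool.not_eq_true] at hrn
            have htw : (lines.drop (i + 1)).takeWhile pvB_isRow = [] := by
              rw [hdc2, List.takeWhile_cons, if_neg (by rw [hrn]; decide)]
            have hdw : (lines.drop (i + 1)).dropWhile pvB_isRow = lines.drop (i + 1) := by
              rw [hdc2, List.dropWhile_cons, if_neg (by rw [hrn]; decide)]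
            have hcne : ¬ ((((pvB_isRow (lines.getD i "") && decide (i + 1 < lines.length)) &&
                pvB_isRow (lines.getD (i + 1) "")) &&
                PySem.Str.isIn ":---" (lines.getD (i + 1) "")) = true) := by
              rw [Bool.and_eq_true]
              rintro ⟨h1, -⟩
              have h2 : pvB_isRow (lines.getD (i + 1) "") = true := (Bool.and_eq_true_iff.mp h1).2
              rw [hrn] at h2
              cases h2
            have hst := pvA_stepTable_none_cond lines i acc hcne
            rw [pvA_loop_succ_none lines fuel i acc hi hst, ih (i + 1) _ (by omega)]
            rw [pvEmitRun_cons_fail _ _ (Or.inl htw), htw, hdw]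
            simp [pvB_emitRun_nil]
        · -- this table-looking line is the last line of the document
          have hnil : lines.drop (i + 1) = [] := List.drop_eq_nil_of_le (by omega)
          have htw : (lines.drop (i + 1)).takeWhile pvB_isRow = [] := by
            rw [hnil]; rfl
          have hdw : (lines.drop (i + 1)).dropWhile pvB_isRow = lines.drop (i + 1) := by
            rw [hnil]; rfl
          have hcne : ¬ ((((pvB_isRow (lines.getD i "") && decide (i + 1 < lines.length)) &&
              pvB_isRow (lines.getD (i + 1) "")) &&
              PySem.Str.isIn ":---" (lines.getD (i + 1) "")) = true) := by
            rw [Bool.and_eq_true]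
            rintro ⟨h1, -⟩
            have h2 := of_decide_eq_true (Bool.and_eq_true_iff.mp (Bool.and_eq_true_iff.mp h1).1).2
            omega
          have hst := pvA_stepTable_none_cond lines i acc hcne
          rw [pvA_loop_succ_none lines fuel i acc hi hst, ih (i + 1) _ (by omega)]
          rw [pvEmitRun_cons_fail _ _ (Or.inl htw), htw, hdw]
          simp [pvB_emitRun_nil]
      · -- ordinary (non-table) line: both sides copy it
        rw [Bool.not_eq_true] at hr
        have hcne : ¬ ((((pvB_isRow (lines.getD i "") && decide (i + 1 < lines.length)) &&
            pvB_isRow (lines.getD (i + 1) "")) &&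
            PySem.Str.isIn ":---" (lines.getD (i + 1) "")) = true) := by
          rw [Bool.and_eq_true]
          rintro ⟨h1, -⟩
          have h2 : pvB_isRow (lines.getD i "") = true :=
            (Bool.and_eq_true_iff.mp (Bool.and_eq_true_iff.mp h1).1).1
          rw [hr] at h2
          cases h2
        have hst := pvA_stepTable_none_cond lines i acc hcne
        rw [pvA_loop_succ_none lines fuel i acc hi hst, ih (i + 1) _ (by omega)]
        rw [hdc, pvB_go_cons, if_neg (by rw [hr]; decide)]
        simp
    · rw [pvA_loop, if_neg hi]
      have hnil : lines.drop i = [] := List.drop_eq_nil_of_le (by omega)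
      simp [hnil, pvB_go_nil]

-- ===== VERDICT (by name: the statement is the Claim_ definition above) =====
theorem modify_markdown_tables_spec : Claim_equal_modify_markdown_tables := by
  intro s _
  unfold Spec_modify_markdown_tables modify_markdown_tables modify_markdown_tables_alt
  rw [pvA_loop_eq _ _ _ _ (by omega)]
  simp
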